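-- pv_equiv track=rewrite | github.com/a-bit-thinker/openquestions | math_proofs/steiner_system.py | _admissibility_checks
-- ===== SOURCE A (Python) =====
-- from math import comb
--
-- def _admissibility_checks(n: int, q: int, r: int) -> list[dict[str, int | None]]:
--     checks: list[dict[str, int | None]] = []
--     for i in range(r):
--         numerator = comb(n - i, r - i)
--         denominator = comb(q - i, r - i)
--         remainder = numerator % denominator
--         quotient = numerator // denominator if remainder == 0 else None
--         checks.append(
--             {
--                 "i": i,
--                 "numerator": numerator,
--                 "denominator": denominator,
--                 "remainder": remainder,
--                 "quotient": quotient,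
--             }
--         )
--     return checks
-- ===== SOURCE B (Python) =====
-- from math import comb
--
-- def _admissibility_checks(n: int, q: int, r: int) -> list[dict[str, int | None]]:
--     checks: list[dict[str, int | None]] = []
--     if r <= 0:
--         return checks
--     # one binomial each, then O(r) incremental updates: C(m-1, k-1) = C(m, k) * k // m
--     num = comb(n, r)
--     den = comb(q, r)
--     for i in range(r):
--         rem = num % den
--         checks.append(
--             {
--                 "i": i,
--                 "numerator": num,
--                 "denominator": den,
--                 "remainder": rem,
--                 "quotient": num // den if rem == 0 else None,
--             }
--         )
--         if i < r - 1:
--             num = num * (r - i) // (n - i)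
--             den = den * (r - i) // (q - i)
--     return checks
-- ===== Notes on version B (the rewrite author's own statement) =====
-- stated objective: faster
-- what changed: B computes comb(n,r) and comb(q,r) once and updates both binomials incrementally via C(m-1,k-1)=C(m,k)*k//m instead of recomputing two binomial coefficients from scratch each iteration (O(r) instead of O(r^2) bigint operations; a timing run measured B ahead at the largest size both programs finished, e.g. ~50x at n=1024).
import Mathlib
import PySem

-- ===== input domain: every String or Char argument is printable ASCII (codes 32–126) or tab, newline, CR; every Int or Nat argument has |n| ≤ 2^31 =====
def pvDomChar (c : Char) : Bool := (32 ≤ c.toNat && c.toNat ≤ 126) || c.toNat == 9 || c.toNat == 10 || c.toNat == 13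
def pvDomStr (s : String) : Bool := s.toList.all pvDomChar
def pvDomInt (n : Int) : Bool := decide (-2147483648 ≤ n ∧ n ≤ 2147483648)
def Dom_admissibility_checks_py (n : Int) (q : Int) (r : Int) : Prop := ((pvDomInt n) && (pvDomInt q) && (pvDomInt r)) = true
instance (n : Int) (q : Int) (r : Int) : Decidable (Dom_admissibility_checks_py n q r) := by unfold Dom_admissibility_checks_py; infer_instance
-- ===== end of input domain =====

-- B replaces A's two fresh binomial coefficients per iteration by incremental updates
-- C(m-1,k-1) = C(m,k)*k // m (O(r) vs O(r^2) bigint operations;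
-- a timing run measured B ahead at the largest size both finished, e.g. ~50x at n=1024).
-- Python's math.comb raises on negative arguments and '% 0' raises ZeroDivisionError;
-- Pre_ excludes exactly those inputs (on every other input A returns normally).


-- ===== PORT A =====
-- math.comb for the arguments Pre_ admits (both ≥ 0); on negative arguments Python raises
-- ValueError — Pre_ excludes those inputs, the guard value 0 is never reached under Pre_.
def pyComb (a b : Int) : Int := if a < 0 ∨ b < 0 then 0 else ((a.toNat).choose (b.toNat) : Int)

def admissibility_checks_py (n : Int) (q : Int) (r : Int) : List (List (String × Option Int)) :=
  (PySem.List.pyRange 0 r 1).foldl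
    (fun checks i =>
      let numerator := pyComb (n - i) (r - i)
      let denominator := pyComb (q - i) (r - i)
      let remainder := PySem.Int.mod numerator denominator
      let quotient : Option Int :=
        if remainder = 0 then some (PySem.Int.floordiv numerator denominator) else none
      checks ++ [[("i", some i), ("numerator", some numerator), ("denominator", some denominator),
                  ("remainder", some remainder), ("quotient", quotient)]])
    []

-- ===== PORT B =====
-- math.comb as B calls it (Pre_ guarantees both arguments ≥ 0 at B's two call sites)
def combAlt (a b : Int) : Int := ((a.toNat).choose (b.toNat) : Int)

def altRow (i num den : Int) : List (String × Option Int) :=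
  let rem := PySem.Int.mod num den
  [("i", some i), ("numerator", some num), ("denominator", some den),
   ("remainder", some rem),
   ("quotient", if rem = 0 then some (PySem.Int.floordiv num den) else none)]

-- B's for-loop: fuel = number of remaining iterations; the update is guarded (i < r - 1)
def altLoop (n q r : Int) : Nat → Int → Int → Int → List (List (String × Option Int))
  | 0, _, _, _ => []
  | 1, i, num, den => [altRow i num den]
  | (fuel + 2), i, num, den =>
      altRow i num den ::
        altLoop n q r (fuel + 1) (i + 1)
          (PySem.Int.floordiv (num * (r - i)) (n - i))
          (PySem.Int.floordiv (den * (r - i)) (q - i))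

def admissibility_checks_py_alt (n : Int) (q : Int) (r : Int) : List (List (String × Option Int)) :=
  if r ≤ 0 then [] else altLoop n q r r.toNat 0 (combAlt n r) (combAlt q r)

-- ===== PRECONDITION & SPEC =====
-- Exactly the inputs on which Python A returns: for r > 0 it needs n - i ≥ 0 and q - i ≥ 0
-- (else math.comb raises ValueError) and comb(q-i, r-i) ≠ 0, i.e. q ≥ r (else ZeroDivisionError).
def Pre_admissibility_checks_py (n : Int) (q : Int) (r : Int) : Prop := 0 < r → (r ≤ q ∧ r - 1 ≤ n)
instance (n : Int) (q : Int) (r : Int) : Decidable (Pre_admissibility_checks_py n q r) := by unfold Pre_admissibility_checks_py; infer_instance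
def pvWitness_admissibility_checks_py : Int × Int × Int := (3, 3, 2)

def Spec_admissibility_checks_py (n : Int) (q : Int) (r : Int) (out : List (List (String × Option Int))) : Prop := out = admissibility_checks_py_alt n q r
instance (n : Int) (q : Int) (r : Int) (out : List (List (String × Option Int))) : Decidable (Spec_admissibility_checks_py n q r out) := by unfold Spec_admissibility_checks_py; infer_instance

-- ===== CLAIM (what is proved, stated in full; the proofs are below) =====
def Claim_equal_admissibility_checks_py : Prop := ∀ (n : Int) (q : Int) (r : Int), Dom_admissibility_checks_py n q r → Pre_admissibility_checks_py n q r → Spec_admissibility_checks_py n q r (admissibility_checks_py n q r)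

-- ===== LEMMAS AND PROOFS =====

-- A's per-iteration record
def rowA (n q r i : Int) : List (String × Option Int) :=
  let numerator := pyComb (n - i) (r - i)
  let denominator := pyComb (q - i) (r - i)
  let remainder := PySem.Int.mod numerator denominator
  let quotient : Option Int :=
    if remainder = 0 then some (PySem.Int.floordiv numerator denominator) else none
  [("i", some i), ("numerator", some numerator), ("denominator", some denominator),
   ("remainder", some remainder), ("quotient", quotient)]

lemma foldl_snoc {α β : Type} (f : β → α) :
    ∀ (l : List β) (acc : List α), l.foldl (fun a i => a ++ [f i]) acc = acc ++ l.map f := by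
  intro l
  induction l with
  | nil => simp
  | cons x xs ih => intro acc; simp [List.foldl, ih]

lemma pyComb_eq_combAlt (a b : Int) (ha : 0 ≤ a) (hb : 0 ≤ b) : pyComb a b = combAlt a b := by
  simp [pyComb, combAlt, not_lt.mpr ha, not_lt.mpr hb]

lemma comb_step (a b : Int) (ha : 0 < a) (hb : 0 < b) :
    PySem.Int.floordiv (combAlt a b * b) a = combAlt (a - 1) (b - 1) := by
  obtain ⟨a', rfl⟩ : ∃ a' : Nat, a = (a' : Int) + 1 :=
    ⟨(a - 1).toNat, by omega⟩
  obtain ⟨b', rfl⟩ : ∃ b' : Nat, b = (b' : Int) + 1 :=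
    ⟨(b - 1).toNat, by omega⟩
  have h1 : ((a' : Int) + 1).toNat = a' + 1 := by omega
  have h2 : ((b' : Int) + 1).toNat = b' + 1 := by omega
  have h3 : ((a' : Int) + 1 - 1).toNat = a' := by omega
  have h4 : ((b' : Int) + 1 - 1).toNat = b' := by omega
  have key : (a' + 1).choose (b' + 1) * (b' + 1) = (a' + 1) * a'.choose b' :=
    (Nat.add_one_mul_choose_eq a' b').symm
  have hb1 : ((b' : Int) + 1) = (((b' + 1 : Nat) : Int)) := by push_cast; ring
  have hcast : combAlt ((a' : Int) + 1) ((b' : Int) + 1) * ((b' : Int) + 1)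
      = (((a' + 1) * a'.choose b' : Nat) : Int) := by
    rw [combAlt, h1, h2, hb1, ← Nat.cast_mul, key]
  rw [hcast]
  have ha1 : ((a' : Int) + 1) = (((a' + 1 : Nat) : Int)) := by push_cast; ring
  rw [ha1, PySem.Int.floordiv_natCast]
  rw [combAlt, Nat.mul_div_cancel_left _ (Nat.succ_pos a'),
      show ((((a' + 1 : Nat)) : Int) - 1).toNat = a' by omega,
      show (((b' : Int) + 1) - 1).toNat = b' by omega]

lemma altRow_eq_rowA (n q r i : Int) (hn : 0 ≤ n - i) (hq : 0 ≤ q - i) (hr : 0 ≤ r - i) :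
    altRow i (combAlt (n - i) (r - i)) (combAlt (q - i) (r - i)) = rowA n q r i := by
  simp [altRow, rowA, pyComb_eq_combAlt _ _ hn hr, pyComb_eq_combAlt _ _ hq hr]

lemma loop_eq (n q r : Int) (hq : r ≤ q) (hn : r - 1 ≤ n) :
    ∀ (fuel : Nat) (i : Int), 0 ≤ i → i + fuel = r →
    altLoop n q r fuel i (combAlt (n - i) (r - i)) (combAlt (q - i) (r - i))
      = (PySem.List.pyRange i r 1).map (rowA n q r) := by
  intro fuel
  induction fuel with
  | zero =>
    intro i _ hir
    have : r ≤ i := by omega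
    rw [PySem.List.pyRange_one_eq_nil this]
    rfl
  | succ f ih =>
    intro i hi hir
    match f, ih with
    | 0, _ =>
      have hlt : i < r := by omega
      rw [PySem.List.pyRange_one_cons hlt, PySem.List.pyRange_one_eq_nil (by omega : r ≤ i + 1)]
      show [altRow i _ _] = [rowA n q r i]
      rw [altRow_eq_rowA n q r i (by omega) (by omega) (by omega)]
    | f' + 1, ih =>
      have hlt : i < r := by omega
      rw [PySem.List.pyRange_one_cons hlt]
      show altRow i _ _ :: altLoop n q r (f' + 1) (i + 1)
          (PySem.Int.floordiv (combAlt (n - i) (r - i) * (r - i)) (n - i))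
          (PySem.Int.floordiv (combAlt (q - i) (r - i) * (r - i)) (q - i))
        = rowA n q r i :: (PySem.List.pyRange (i + 1) r 1).map (rowA n q r)
      rw [altRow_eq_rowA n q r i (by omega) (by omega) (by omega)]
      rw [comb_step (n - i) (r - i) (by omega) (by omega),
          comb_step (q - i) (r - i) (by omega) (by omega)]
      have e1 : n - i - 1 = n - (i + 1) := by ring
      have e2 : r - i - 1 = r - (i + 1) := by ring
      have e3 : q - i - 1 = q - (i + 1) := by ring
      rw [e1, e2, e3, ih (i + 1) (by omega) (by omega)]

-- ===== VERDICT (by name: the statement is the Claim_ definition above) =====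
theorem admissibility_checks_py_spec : Claim_equal_admissibility_checks_py := by
  intro n q r _ hpre
  unfold Spec_admissibility_checks_py admissibility_checks_py admissibility_checks_py_alt
  by_cases hr : r ≤ 0
  · rw [PySem.List.pyRange_one_eq_nil hr, if_pos hr]
    rfl
  · obtain ⟨hq, hn⟩ := hpre (by omega)
    rw [if_neg hr]
    rw [show (fun (checks : List (List (String × Option Int))) (i : Int) =>
          let numerator := pyComb (n - i) (r - i)
          let denominator := pyComb (q - i) (r - i)
          let remainder := PySem.Int.mod numerator denominator
          let quotient : Option Int :=
            if remainder = 0 then some (PySem.Int.floordiv numerator denominator) else none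
          checks ++ [[("i", some i), ("numerator", some numerator), ("denominator", some denominator),
                      ("remainder", some remainder), ("quotient", quotient)]])
        = (fun checks i => checks ++ [rowA n q r i]) from rfl]
    rw [foldl_snoc (rowA n q r) (PySem.List.pyRange 0 r 1) []]
    have h0 : combAlt n r = combAlt (n - 0) (r - 0) := by norm_num
    have h1 : combAlt q r = combAlt (q - 0) (r - 0) := by norm_num
    rw [h0, h1, loop_eq n q r hq hn r.toNat 0 le_rfl (by omega)]
    rfl
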